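-- pv_equiv track=rewrite | github.com/nathan29849/TIL | 03_Python/Study/백준_Z.py | solution
-- ===== SOURCE A (Python) =====
-- def solution(n, r, c):
--     base = 0
--     while n > 1:
--         # 행(row)이 2^n 절반보다 작다면
--         if r < (2**n)//2:
--             if c < (2**n)//2:           # 좌 상
--                 pass
--             else:                       # 우 상
--                 base += (2**(n-1))**2 * 1
--                 c -= (2**n)//2 # 열 update
--
--         else:   # r >= (2**n)//2
--             if c < (2**n)//2:           # 좌 하
--                 base += ((2**(n-1))**2) * 2
--                 r -= (2**n)//2 # 행 update
--
--             else:                       # 우 하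
--                 base += ((2**(n-1))**2) * 3
--                 # 행, 열 update
--                 r -= (2**n)//2
--                 c -= (2**n)//2
--         n -= 1
--
--     if r==0 and c==0:   # 좌 상
--         return base
--     elif r==0 and c==1: # 우 상
--         return base+1
--     elif r==1 and c==0: # 좌 하
--         return base+2
--     else:
--         return base+3
-- ===== SOURCE B (Python) =====
-- def _axis(n, v):
--     # 1-D half of the Z-curve descent: scan one coordinate's levels alone,
--     # halving a single precomputed half and Horner-accumulating the bits.
--     s = 0
--     half = 2 ** max(n - 1, 0)
--     while half > 1:
--         s = 4 * s + (v >= half)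
--         if v >= half:
--             v -= half
--         half //= 2
--     return 4 * s, v
--
-- def solution(n, r, c):
--     sr, r = _axis(n, r)
--     sc, c = _axis(n, c)
--     if r == 0 and c == 0:
--         t = 0
--     elif r == 0 and c == 1:
--         t = 1
--     elif r == 1 and c == 0:
--         t = 2
--     else:
--         t = 3
--     return 2 * sr + sc + t
-- ===== Notes on version B (the rewrite author's own statement) =====
-- stated objective: faster
-- what changed: B decomposes the Z-curve descent into two independent one-dimensional greedy scans (one per coordinate) that keep a single precomputed half and halve it in place each step, Horner-accumulating the bits (s = 4*s + bit), instead of A's combined quadrant walk that recomputes and squares the big-int powers 2**n, (2**n)//2 and (2**(n-1))**2 from scratch at every one of its n iterations.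
import Mathlib
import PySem

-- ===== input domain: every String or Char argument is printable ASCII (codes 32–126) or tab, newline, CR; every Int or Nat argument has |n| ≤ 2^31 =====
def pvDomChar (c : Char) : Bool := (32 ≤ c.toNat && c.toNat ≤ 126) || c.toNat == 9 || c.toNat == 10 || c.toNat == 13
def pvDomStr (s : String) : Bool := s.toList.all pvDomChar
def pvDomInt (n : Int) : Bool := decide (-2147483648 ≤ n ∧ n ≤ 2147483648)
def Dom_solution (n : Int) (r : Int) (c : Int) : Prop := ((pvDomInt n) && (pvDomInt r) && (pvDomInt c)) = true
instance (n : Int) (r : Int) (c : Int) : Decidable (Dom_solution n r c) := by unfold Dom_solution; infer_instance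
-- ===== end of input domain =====

-- B replaces A's combined quadrant walk (which recomputes 2**n-sized powers at
-- every iteration) by two independent per-coordinate greedy scans with a single
-- halved variable and Horner bit accumulation; equal to A on every input.

-- ===== PORT A =====
-- the while-loop of A: state (n, r, c, base); inside the loop 1 < n, so
-- Python's 2**n is exactly (2 : Int) ^ n.toNat; the trailing if-chain of A is
-- the else-branch (loop exited)
def solLoopA (n r c base : Int) : Int :=
  if 1 < n then
    if r < PySem.Int.floordiv ((2 : Int) ^ n.toNat) 2 then
      if c < PySem.Int.floordiv ((2 : Int) ^ n.toNat) 2 then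
        solLoopA (n - 1) r c base
      else
        solLoopA (n - 1) r (c - PySem.Int.floordiv ((2 : Int) ^ n.toNat) 2)
          (base + ((2 : Int) ^ (n - 1).toNat) ^ 2 * 1)
    else
      if c < PySem.Int.floordiv ((2 : Int) ^ n.toNat) 2 then
        solLoopA (n - 1) (r - PySem.Int.floordiv ((2 : Int) ^ n.toNat) 2) c
          (base + ((2 : Int) ^ (n - 1).toNat) ^ 2 * 2)
      else
        solLoopA (n - 1) (r - PySem.Int.floordiv ((2 : Int) ^ n.toNat) 2)
          (c - PySem.Int.floordiv ((2 : Int) ^ n.toNat) 2)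
          (base + ((2 : Int) ^ (n - 1).toNat) ^ 2 * 3)
  else
    if r = 0 ∧ c = 0 then base
    else if r = 0 ∧ c = 1 then base + 1
    else if r = 1 ∧ c = 0 then base + 2
    else base + 3
termination_by n.toNat
decreasing_by all_goals omega

def solution (n : Int) (r : Int) (c : Int) : Int := solLoopA n r c 0

-- ===== PORT B =====
-- termination helper for _axis's while-loop (half //= 2 shrinks half.toNat)
theorem pvHalf_toNat_lt (x : Int) (hx : 0 < x) :
    (PySem.Int.floordiv x 2).toNat < x.toNat := by
  rw [PySem.Int.floordiv_eq_ediv_of_pos (by omega : (0:Int) < 2)]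
  omega

-- the while-loop of _axis: state (half, v, s); Python's `v >= half` used as an
-- int is `if half ≤ v then 1 else 0`; returns (4*s, v) as _axis does
def axisLoop (half v s : Int) : Int × Int :=
  if 1 < half then
    axisLoop (PySem.Int.floordiv half 2)
      (if half ≤ v then v - half else v)
      (4 * s + (if half ≤ v then 1 else 0))
  else (4 * s, v)
termination_by half.toNat
decreasing_by exact pvHalf_toNat_lt half (by omega)

-- _axis(n, v): half = 2 ** max(n - 1, 0) computed once (exponent nonneg, so
-- exactly (max (n-1) 0).toNat), then the loop
def axisB (n v : Int) : Int × Int := axisLoop ((2 : Int) ^ (max (n - 1) 0).toNat) v 0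

def solution_alt (n : Int) (r : Int) (c : Int) : Int :=
  let pr := axisB n r
  let pc := axisB n c
  let t : Int :=
    if pr.2 = 0 ∧ pc.2 = 0 then 0
    else if pr.2 = 0 ∧ pc.2 = 1 then 1
    else if pr.2 = 1 ∧ pc.2 = 0 then 2
    else 3
  2 * pr.1 + pc.1 + t

-- ===== PRECONDITION & SPEC =====
-- (no Pre_: Python A returns normally on every int input, and B matches it everywhere)
def Spec_solution (n : Int) (r : Int) (c : Int) (out : Int) : Prop := out = solution_alt n r c
instance (n : Int) (r : Int) (c : Int) (out : Int) : Decidable (Spec_solution n r c out) := by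
  unfold Spec_solution; infer_instance

-- ===== CLAIM (what is proved, stated in full; the proofs are below) =====
def Claim_equal_solution : Prop := ∀ (n : Int) (r : Int) (c : Int),
  Dom_solution n r c → Spec_solution n r c (solution n r c)

-- ===== LEMMAS AND PROOFS =====

-- the final four-way table, shared shape of A's if-chain and B's t
def tbl (x y : Int) : Int :=
  if x = 0 ∧ y = 0 then 0
  else if x = 0 ∧ y = 1 then 1
  else if x = 1 ∧ y = 0 then 2
  else 3

theorem axisLoop_one (v : Int) : axisLoop 1 v 0 = (0, v) := by
  rw [axisLoop]; norm_num

-- the accumulator of axisLoop is linear: running with s instead of 0 adds s·4^(m+1)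
theorem axisLoop_shift (m : Nat) : ∀ v s : Int,
    axisLoop ((2 : Int) ^ m) v s =
      (s * 4 ^ (m + 1) + (axisLoop ((2 : Int) ^ m) v 0).1,
       (axisLoop ((2 : Int) ^ m) v 0).2) := by
  induction m with
  | zero =>
    intro v s
    have hu : axisLoop ((2:Int) ^ 0) v s = (4 * s, v) := by
      rw [pow_zero, axisLoop]; norm_num
    rw [hu, pow_zero, axisLoop_one]
    simp [mul_comm]
  | succ m ih =>
    intro v s
    have h1 : (1 : Int) < 2 ^ (m + 1) := by
      have h2 : (2 : Int) ^ 1 ≤ 2 ^ (m + 1) := pow_le_pow_right₀ (by omega) (by omega)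
      simpa using h2
    have hdf : PySem.Int.floordiv ((2 : Int) ^ (m + 1)) 2 = (2 : Int) ^ m := by
      rw [PySem.Int.floordiv_eq_ediv_of_pos (by omega : (0:Int) < 2), pow_succ]
      exact Int.mul_ediv_cancel _ (by omega)
    have unf : ∀ v s : Int, axisLoop ((2 : Int) ^ (m + 1)) v s
        = axisLoop ((2 : Int) ^ m)
            (if (2 : Int) ^ (m + 1) ≤ v then v - 2 ^ (m + 1) else v)
            (4 * s + if (2 : Int) ^ (m + 1) ≤ v then 1 else 0) := by
      intro v s
      rw [axisLoop, if_pos h1, hdf]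
    rw [unf v s, unf v 0]
    set v2 := (if (2 : Int) ^ (m + 1) ≤ v then v - 2 ^ (m + 1) else v) with hv2
    set b := (if (2 : Int) ^ (m + 1) ≤ v then (1:Int) else 0) with hb
    rw [ih v2 (4 * s + b), ih v2 (4 * 0 + b)]
    simp only [Prod.mk.injEq]
    constructor
    · ring
    · trivial

-- A's loop equals base plus B's whole computation, for every integer input
theorem solLoopA_eq (k : Nat) : ∀ n r c base : Int, n.toNat = k →
    solLoopA n r c base =
      base + 2 * (axisB n r).1 + (axisB n c).1 + tbl (axisB n r).2 (axisB n c).2 := by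
  induction k using Nat.strong_induction_on with
  | _ k ih =>
    intro n r c base hk
    rw [solLoopA]
    by_cases h : 1 < n
    · -- one loop step of A = one step of each axis scan of B
      rw [if_pos h]
      have hm : 2 ≤ n.toNat := by omega
      have hmax : (max (n - 1) 0).toNat = n.toNat - 1 := by omega
      have hmax' : (max (n - 1 - 1) 0).toNat = n.toNat - 2 := by omega
      have hdfA : PySem.Int.floordiv ((2 : Int) ^ n.toNat) 2 = (2 : Int) ^ (n.toNat - 1) := by
        rw [PySem.Int.floordiv_eq_ediv_of_pos (by omega : (0:Int) < 2)]
        have hsplit : (2 : Int) ^ n.toNat = (2 : Int) ^ (n.toNat - 1) * 2 := by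
          rw [← pow_succ]; congr 1; omega
        rw [hsplit]
        exact Int.mul_ediv_cancel _ (by omega)
      have hdfB : PySem.Int.floordiv ((2 : Int) ^ (n.toNat - 1)) 2 = (2 : Int) ^ (n.toNat - 2) := by
        rw [PySem.Int.floordiv_eq_ediv_of_pos (by omega : (0:Int) < 2)]
        have hsplit : (2 : Int) ^ (n.toNat - 1) = (2 : Int) ^ (n.toNat - 2) * 2 := by
          rw [← pow_succ]; congr 1; omega
        rw [hsplit]
        exact Int.mul_ediv_cancel _ (by omega)
      have h1B : (1 : Int) < 2 ^ (n.toNat - 1) := by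
        have h2 : (2 : Int) ^ 1 ≤ 2 ^ (n.toNat - 1) := pow_le_pow_right₀ (by omega) (by omega)
        simpa using h2
      have hsq : ((2 : Int) ^ (n - 1).toNat) ^ 2 = (4 : Int) ^ (n.toNat - 1) := by
        have e : (n - 1).toNat = n.toNat - 1 := by omega
        rw [e, ← pow_mul]
        have h4 : (4 : Int) = 2 ^ 2 := by norm_num
        rw [h4, ← pow_mul]
        congr 1
        omega
      have hpow : (n.toNat - 2) + 1 = n.toNat - 1 := by omega
      -- one unfolding of each axis scan, accumulator normalised by axisLoop_shift
      have hstep : ∀ v : Int, axisB n v =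
          ((if (2 : Int) ^ (n.toNat - 1) ≤ v then (1:Int) else 0) * 4 ^ (n.toNat - 1)
             + (axisB (n - 1) (if (2 : Int) ^ (n.toNat - 1) ≤ v then v - 2 ^ (n.toNat - 1) else v)).1,
           (axisB (n - 1) (if (2 : Int) ^ (n.toNat - 1) ≤ v then v - 2 ^ (n.toNat - 1) else v)).2) := by
        intro v
        show axisLoop ((2 : Int) ^ (max (n - 1) 0).toNat) v 0 = _
        rw [hmax, axisLoop, if_pos h1B, hdfB]
        set v2 := (if (2 : Int) ^ (n.toNat - 1) ≤ v then v - 2 ^ (n.toNat - 1) else v) with hv2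
        set b := (if (2 : Int) ^ (n.toNat - 1) ≤ v then (1:Int) else 0) with hb
        rw [axisLoop_shift (n.toNat - 2) v2 (4 * 0 + b), hpow]
        simp only [axisB, hmax', Prod.mk.injEq]
        constructor
        · ring
        · trivial
      have hlt : (n - 1).toNat < k := by omega
      have hihs := ih _ hlt (n - 1)
      rw [hdfA, hstep r, hstep c]
      by_cases hr : (2 : Int) ^ (n.toNat - 1) ≤ r <;>
        by_cases hc : (2 : Int) ^ (n.toNat - 1) ≤ c
      · -- bottom-right quadrant
        rw [if_neg (not_lt.mpr hr), if_neg (not_lt.mpr hc),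
          hihs _ _ _ rfl, hsq]
        simp only [if_pos hr, if_pos hc]
        ring
      · -- bottom-left quadrant
        rw [if_neg (not_lt.mpr hr), if_pos (not_le.mp hc),
          hihs _ _ _ rfl, hsq]
        simp only [if_pos hr, if_neg hc]
        ring
      · -- top-right quadrant
        rw [if_pos (not_le.mp hr), if_neg (not_lt.mpr hc),
          hihs _ _ _ rfl, hsq]
        simp only [if_neg hr, if_pos hc]
        ring
      · -- top-left quadrant
        rw [if_pos (not_le.mp hr), if_pos (not_le.mp hc),
          hihs _ _ _ rfl]
        simp only [if_neg hr, if_neg hc]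
        ring
    · -- loop never runs: half = 2^0 = 1 and both sides are the final table
      simp only [h, if_false]
      have hmax : (max (n - 1) 0).toNat = 0 := by omega
      simp only [axisB, hmax, pow_zero, axisLoop_one, tbl]
      split_ifs <;> ring

-- ===== VERDICT (by name: the statement is the Claim_ definition above) =====
theorem solution_spec : Claim_equal_solution := by
  intro n r c _
  unfold Spec_solution solution
  rw [solLoopA_eq n.toNat n r c 0 rfl]
  simp only [solution_alt, tbl]
  ring
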